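-- pv_equiv track=rewrite | github.com/tadash10/vulristics | functions_report_vulnerabilities.py | get_vulnerability_types_priority
-- ===== SOURCE A (Python) =====
-- def get_vulnerability_types_priority(vulnerability_type_data):
--     vulnerability_types_priority = list()
--     criticalities = dict()
--     for vuln_type in vulnerability_type_data:
--         if not vulnerability_type_data[vuln_type]['criticality'] in criticalities:
--             criticalities[vulnerability_type_data[vuln_type]['criticality']] = list()
--         criticalities[vulnerability_type_data[vuln_type]['criticality']].append(vuln_type)
--     criticality_keys = list(criticalities.keys())
--     criticality_keys.sort(reverse=True)
--     for criticality_key in criticality_keys: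
--         vuln_types = criticalities[criticality_key]
--         vuln_types.sort()
--         for vuln_type in vuln_types:
--             vulnerability_types_priority.append(vuln_type)
--     return vulnerability_types_priority
-- ===== SOURCE B (Python) =====
-- def get_vulnerability_types_priority(vulnerability_type_data):
--     # Same result as the original, without the criticality->names bucket dict:
--     # sort the names alphabetically, then stable-sort by criticality descending.
--     keys = sorted(vulnerability_type_data)
--     keys.sort(key=lambda v: vulnerability_type_data[v]['criticality'], reverse=True)
--     return keys
-- ===== Notes on version B (the rewrite author's own statement) =====
-- stated objective: simpler
-- what changed: B drops A's criticality->names bucket dict and its two-level emit loop; it sorts the key list alphabetically and then stable-sorts it by criticality descending, the stability giving the same tie order.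
import Mathlib
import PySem

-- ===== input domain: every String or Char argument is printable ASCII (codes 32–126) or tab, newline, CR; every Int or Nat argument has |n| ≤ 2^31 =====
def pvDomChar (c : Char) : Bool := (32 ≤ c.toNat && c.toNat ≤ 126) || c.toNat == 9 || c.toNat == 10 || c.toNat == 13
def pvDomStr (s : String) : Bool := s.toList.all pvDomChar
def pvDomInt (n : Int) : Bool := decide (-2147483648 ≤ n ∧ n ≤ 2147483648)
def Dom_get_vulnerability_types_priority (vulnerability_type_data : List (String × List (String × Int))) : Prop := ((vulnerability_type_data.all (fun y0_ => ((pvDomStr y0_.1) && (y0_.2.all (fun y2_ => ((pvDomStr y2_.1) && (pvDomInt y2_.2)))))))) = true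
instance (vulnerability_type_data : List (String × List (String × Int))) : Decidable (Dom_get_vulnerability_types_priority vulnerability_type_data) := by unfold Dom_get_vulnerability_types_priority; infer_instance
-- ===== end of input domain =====

-- B drops A's criticality->names bucket dict: it sorts the key list alphabetically and
-- then stable-sorts it by criticality descending (same return value; no side effects involved).


-- ===== PORT A =====
-- Both Pythons read vulnerability_type_data[v]['criticality']: dict lookup through both levels
-- (the association list is read as the Python dict it denotes, duplicates collapsing Python-style).
-- The default 0 is never used inside Pre_ (Python raises KeyError there, which Pre_ excludes).
def pvCrit (vulnerability_type_data : List (String × List (String × Int))) (v : String) : Int :=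
  (PySem.Dict.ofList ((PySem.Dict.ofList vulnerability_type_data).getD v [])).getD "criticality" 0

-- A's first loop: the criticality -> [vuln_type] grouping dict.
def pvGroup (crit : String → Int) (K : List String) : PySem.Dict Int (List String) :=
  K.foldl (fun c vuln_type =>
    let cr := crit vuln_type
    let c' := if c.contains cr then c else c.insert cr []
    c'.modify cr [] (fun l => l ++ [vuln_type])) PySem.Dict.empty

def get_vulnerability_types_priority (vulnerability_type_data : List (String × List (String × Int))) : List String :=
  let criticalities := pvGroup (pvCrit vulnerability_type_data) (PySem.Dict.ofList vulnerability_type_data).keys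
  let criticality_keys := PySem.List.sorted criticalities.keys (fun x => x) true
  criticality_keys.foldl (fun acc criticality_key =>
    (PySem.List.sorted (criticalities.getD criticality_key []) (fun x => x) false).foldl
      (fun a vuln_type => a ++ [vuln_type]) acc) []

-- ===== PORT B =====
def get_vulnerability_types_priority_alt (vulnerability_type_data : List (String × List (String × Int))) : List String :=
  let keys := PySem.List.sorted (PySem.Dict.ofList vulnerability_type_data).keys (fun x => x) false
  PySem.List.sorted keys (fun v => pvCrit vulnerability_type_data v) true

-- ===== PRECONDITION & SPEC =====
-- Pre_ excludes exactly the inputs on which Python A raises KeyError: a vulnerability type whose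
-- data dict (the last binding of that key, Python dict semantics) has no 'criticality' entry.
def Pre_get_vulnerability_types_priority (vulnerability_type_data : List (String × List (String × Int))) : Prop :=
  ∀ p ∈ (PySem.Dict.ofList vulnerability_type_data).items,
    (PySem.Dict.ofList p.2).contains "criticality" = true
instance (vulnerability_type_data : List (String × List (String × Int))) : Decidable (Pre_get_vulnerability_types_priority vulnerability_type_data) := by unfold Pre_get_vulnerability_types_priority; infer_instance
def pvWitness_get_vulnerability_types_priority : (List (String × List (String × Int))) :=
  [("xss", [("criticality", 1)]), ("rce", [("criticality", 2)]), ("dos", [("criticality", 1)])]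

def Spec_get_vulnerability_types_priority (vulnerability_type_data : List (String × List (String × Int))) (out : List String) : Prop := out = get_vulnerability_types_priority_alt vulnerability_type_data
instance (vulnerability_type_data : List (String × List (String × Int))) (out : List String) : Decidable (Spec_get_vulnerability_types_priority vulnerability_type_data out) := by unfold Spec_get_vulnerability_types_priority; infer_instance

-- ===== CLAIM (what is proved, stated in full; the proofs are below) =====
def Claim_equal_get_vulnerability_types_priority : Prop := ∀ (vulnerability_type_data : List (String × List (String × Int))), Dom_get_vulnerability_types_priority vulnerability_type_data → Pre_get_vulnerability_types_priority vulnerability_type_data → Spec_get_vulnerability_types_priority vulnerability_type_data (get_vulnerability_types_priority vulnerability_type_data)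

-- ===== LEMMAS AND PROOFS =====

-- The lexicographic order (criticality descending, then name ascending) both programs realise.
def pvR (crit : String → Int) (a b : String) : Prop :=
  crit b < crit a ∨ (crit a = crit b ∧ a ≤ b)

-- the combined key under which pvR is exactly ≤
def pvKey (crit : String → Int) (v : String) : Lex (Int × String) := toLex (-(crit v), v)

theorem pvKey_injective (crit : String → Int) : Function.Injective (pvKey crit) := by
  intro a b h
  have := congrArg (fun x => (ofLex x).2) h
  simpa [pvKey] using this

theorem pvR_iff_key_le (crit : String → Int) (a b : String) :
    pvR crit a b ↔ pvKey crit a ≤ pvKey crit b := by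
  unfold pvR pvKey
  rw [Prod.Lex.toLex_le_toLex]
  constructor
  · rintro (h | ⟨h1, h2⟩)
    · exact Or.inl (by omega)
    · exact Or.inr ⟨by omega, h2⟩
  · rintro (h | ⟨h1, h2⟩)
    · exact Or.inl (by simpa using by omega)
    · exact Or.inr ⟨by omega, h2⟩

-- ---- A side: characterise the grouping dict ----

theorem pvGroup_step (c : PySem.Dict Int (List String)) (cr : Int) (v : String) :
    ((if c.contains cr then c else c.insert cr []).modify cr [] (fun l => l ++ [v]))
      = c.modify cr [] (fun l => l ++ [v]) := by
  by_cases h : c.contains cr = true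
  · simp [h]
  · simp only [h, Bool.false_eq_true, if_false]
    unfold PySem.Dict.modify
    rw [PySem.Dict.getD_insert_self, PySem.Dict.insert_insert_self,
        PySem.Dict.getD_of_not_contains _ _ (by simpa using h)]

theorem pvGroup_eq_modify_fold (crit : String → Int) (K : List String) :
    pvGroup crit K
      = K.foldl (fun c v => c.modify (crit v) [] (fun l => l ++ [v])) PySem.Dict.empty := by
  unfold pvGroup
  congr 1
  funext c v
  exact pvGroup_step c (crit v) v

theorem pvGroup_getD (crit : String → Int) (K : List String) (k : Int) :
    (pvGroup crit K).getD k [] = K.filter (fun v => crit v == k) := by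
  rw [pvGroup_eq_modify_fold]
  have h := PySem.Dict.getD_foldl_modify_append (K.map (fun v => (crit v, v)))
      (PySem.Dict.empty : PySem.Dict Int (List String)) k
  rw [List.foldl_map] at h
  simpa [List.filter_map, List.map_map, Function.comp_def] using h

theorem pvGroup_keys_nodup (crit : String → Int) (K : List String) :
    (pvGroup crit K).keys.Nodup := by
  rw [pvGroup_eq_modify_fold]
  exact PySem.Dict.nodup_keys_foldl_modify_key K crit [] (fun _ v => fun l => l ++ [v]) _
    (by simp [PySem.Dict.keys_empty])

theorem pvGroup_keys_cover (crit : String → Int) (K : List String) (v : String) (hv : v ∈ K) :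
    crit v ∈ (pvGroup crit K).keys := by
  rw [pvGroup_eq_modify_fold,
      PySem.Dict.keys_foldl_modify_key K crit [] (fun _ v => fun l => l ++ [v]) _]
  have : (PySem.Set.update (PySem.Dict.empty : PySem.Dict Int (List String)).keys (K.map crit))
      = PySem.Set.ofList (K.map crit) := by
    simp [PySem.Set.ofList_eq_foldl, PySem.Set.update, PySem.Dict.keys_empty]
  rw [this, PySem.Set.mem_ofList]
  exact List.mem_map_of_mem hv

-- flatMap of perm-equal chunks
theorem pv_flatMap_perm {α β : Type} (l : List α) (f g : α → List β)
    (h : ∀ a ∈ l, (f a).Perm (g a)) : (l.flatMap f).Perm (l.flatMap g) := by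
  induction l with
  | nil => simp
  | cons x xs ih =>
      simp only [List.flatMap_cons]
      exact (h x (by simp)).append (ih (fun a ha => h a (by simp [ha])))

-- a family of filters over a nodup covering key list partitions K
theorem pv_flatMap_filter_perm (crit : String → Int) :
    ∀ (ks : List Int) (K : List String), ks.Nodup → (∀ v ∈ K, crit v ∈ ks) →
      (ks.flatMap (fun k => K.filter (fun v => crit v == k))).Perm K := by
  intro ks
  induction ks with
  | nil =>
      intro K _ hcov
      have : K = [] := List.eq_nil_iff_forall_not_mem.2 (fun v hv => by simpa using hcov v hv)
      simp [this]
  | cons k ks ih =>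
      intro K hnd hcov
      simp only [List.flatMap_cons]
      have hk : k ∉ ks := (List.nodup_cons.1 hnd).1
      have hstep : ∀ k' ∈ ks, K.filter (fun v => crit v == k')
          = (K.filter (fun v => !(crit v == k))).filter (fun v => crit v == k') := by
        intro k' hk'
        rw [List.filter_filter]
        apply List.filter_congr
        intro v _
        by_cases hcv : crit v = k'
        · have hkk : k' ≠ k := fun hh => hk (hh ▸ hk')
          simp [hcv]
          exact hkk
        · simp [hcv]
      have hflat : ks.flatMap (fun k' => K.filter (fun v => crit v == k'))
          = ks.flatMap (fun k' => (K.filter (fun v => !(crit v == k))).filter (fun v => crit v == k')) :=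
        List.flatMap_congr hstep
      have hcov' : ∀ v ∈ K.filter (fun v => !(crit v == k)), crit v ∈ ks := by
        intro v hv
        rcases List.mem_filter.1 hv with ⟨hvK, hvne⟩
        rcases List.mem_cons.1 (hcov v hvK) with h | h
        · simp [h] at hvne
        · exact h
      have hperm := ih (K.filter (fun v => !(crit v == k))) (List.nodup_cons.1 hnd).2 hcov'
      rw [hflat]
      exact List.Perm.trans (List.Perm.append_left _ hperm) (List.filter_append_perm _ K)

-- ---- B side: stability of the reverse sort ----

theorem pv_insertBy_pairwise (crit : String → Int) (x : String) :
    ∀ (acc : List String), acc.Pairwise (pvR crit) → (∀ y ∈ acc, y ≤ x) →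
      (PySem.List.insertBy (fun a b => decide (crit b < crit a)) x acc).Pairwise (pvR crit) := by
  intro acc
  induction acc with
  | nil => intro _ _; simp [PySem.List.insertBy]
  | cons y ys ih =>
      intro hpw hle
      rw [List.pairwise_cons] at hpw
      by_cases h : crit y < crit x
      · simp only [PySem.List.insertBy, h, decide_true, if_true]
        refine List.pairwise_cons.2 ⟨?_, List.pairwise_cons.2 hpw⟩
        intro z hz
        rcases List.mem_cons.1 hz with rfl | hz'
        · exact Or.inl h
        · rcases hpw.1 z hz' with h2 | ⟨h2, _⟩
          · exact Or.inl (lt_trans h2 h)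
          · exact Or.inl (h2 ▸ h)
      · simp only [PySem.List.insertBy, h, decide_false, Bool.false_eq_true, if_false]
        refine List.pairwise_cons.2 ⟨?_, ih hpw.2 (fun z hz => hle z (by simp [hz]))⟩
        intro z hz
        rcases (PySem.List.mem_insertBy _ _ _ _).1 hz with rfl | hz'
        · rcases lt_or_eq_of_le (le_of_not_gt h) with h2 | h2
          · exact Or.inl h2
          · exact Or.inr ⟨h2.symm, hle y (by simp)⟩
        · exact hpw.1 z hz'

theorem pv_foldl_insertBy_pairwise (crit : String → Int) :
    ∀ (xs acc : List String), acc.Pairwise (pvR crit) → (∀ y ∈ acc, ∀ x ∈ xs, y ≤ x) →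
      xs.Pairwise (· ≤ ·) →
      (xs.foldl (fun a x => PySem.List.insertBy (fun a b => decide (crit b < crit a)) x a) acc).Pairwise (pvR crit) := by
  intro xs
  induction xs with
  | nil => intro acc h _ _; simpa using h
  | cons x xs ih =>
      intro acc hpw hord hxs
      rw [List.pairwise_cons] at hxs
      simp only [List.foldl_cons]
      apply ih
      · exact pv_insertBy_pairwise crit x acc hpw (fun y hy => hord y hy x (by simp))
      · intro y hy x' hx'
        rcases (PySem.List.mem_insertBy _ _ _ _).1 hy with rfl | hy'
        · exact hxs.1 x' hx'
        · exact hord y hy' x' (by simp [hx'])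
      · exact hxs.2

theorem pv_sorted_rev_stable (crit : String → Int) (xs : List String)
    (hxs : xs.Pairwise (· ≤ ·)) :
    (PySem.List.sorted xs crit true).Pairwise (pvR crit) := by
  rw [PySem.List.sorted_rev_eq_foldl_insertBy]
  exact pv_foldl_insertBy_pairwise crit xs [] (by simp) (by simp) hxs

-- ---- assembling both sides ----

theorem pv_A_flatMap (d : List (String × List (String × Int))) :
    get_vulnerability_types_priority d
      = (PySem.List.sorted (pvGroup (pvCrit d) (PySem.Dict.ofList d).keys).keys (fun x => x) true).flatMap
          (fun k => PySem.List.sorted ((PySem.Dict.ofList d).keys.filter (fun v => pvCrit d v == k)) (fun x => x) false) := by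
  unfold get_vulnerability_types_priority
  simp only [PySem.List.foldl_append_singleton_eq_self, PySem.List.foldl_append_eq_flatMap,
    List.nil_append, pvGroup_getD]

theorem pv_A_pairwise (d : List (String × List (String × Int))) :
    (get_vulnerability_types_priority d).Pairwise (pvR (pvCrit d)) := by
  rw [pv_A_flatMap]
  rw [List.pairwise_flatMap]
  constructor
  · intro k _
    refine (PySem.List.sorted_pairwise _ _).imp_of_mem ?_
    intro a b ha hb hle
    have ha' := List.mem_filter.1 ((PySem.List.mem_sorted _ _ _ _).1 ha)
    have hb' := List.mem_filter.1 ((PySem.List.mem_sorted _ _ _ _).1 hb)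
    have h1 : pvCrit d a = k := by simpa using ha'.2
    have h2 : pvCrit d b = k := by simpa using hb'.2
    exact Or.inr ⟨by rw [h1, h2], hle⟩
  · have hnodup : (PySem.List.sorted (pvGroup (pvCrit d) (PySem.Dict.ofList d).keys).keys (fun x => x) true).Nodup :=
      (PySem.List.sorted_perm _ _ _).symm.nodup (pvGroup_keys_nodup _ _)
    have hord := PySem.List.sorted_pairwise_rev (pvGroup (pvCrit d) (PySem.Dict.ofList d).keys).keys (fun x => x)
    refine (hord.and hnodup).imp_of_mem ?_
    intro k1 k2 _ _ h x hx y hy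
    have hx' := List.mem_filter.1 ((PySem.List.mem_sorted _ _ _ _).1 hx)
    have hy' := List.mem_filter.1 ((PySem.List.mem_sorted _ _ _ _).1 hy)
    have h1 : pvCrit d x = k1 := by simpa using hx'.2
    have h2 : pvCrit d y = k2 := by simpa using hy'.2
    left
    rw [h1, h2]
    exact lt_of_le_of_ne h.1 (Ne.symm h.2)

theorem pv_A_perm (d : List (String × List (String × Int))) :
    (get_vulnerability_types_priority d).Perm (PySem.Dict.ofList d).keys := by
  rw [pv_A_flatMap]
  refine List.Perm.trans (pv_flatMap_perm _ _ _ (fun k _ => PySem.List.sorted_perm _ _ _)) ?_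
  apply pv_flatMap_filter_perm
  · exact ((PySem.List.sorted_perm _ _ _).symm.nodup (pvGroup_keys_nodup _ _))
  · intro v hv
    rw [PySem.List.mem_sorted]
    exact pvGroup_keys_cover _ _ v hv

theorem pv_B_pairwise (d : List (String × List (String × Int))) :
    (get_vulnerability_types_priority_alt d).Pairwise (pvR (pvCrit d)) := by
  unfold get_vulnerability_types_priority_alt
  exact pv_sorted_rev_stable _ _ (PySem.List.sorted_pairwise _ (fun x => x))

theorem pv_B_perm (d : List (String × List (String × Int))) :
    (get_vulnerability_types_priority_alt d).Perm (PySem.Dict.ofList d).keys := by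
  unfold get_vulnerability_types_priority_alt
  exact (PySem.List.sorted_perm _ _ _).trans (PySem.List.sorted_perm _ _ _)

theorem pv_main (d : List (String × List (String × Int))) :
    get_vulnerability_types_priority d = get_vulnerability_types_priority_alt d := by
  refine PySem.List.eq_of_perm_of_pairwise_le_of_injective (pvKey (pvCrit d))
    (pvKey_injective _) ((pv_A_perm d).trans (pv_B_perm d).symm) ?_ ?_
  · exact (pv_A_pairwise d).imp_of_mem (fun _ _ h => (pvR_iff_key_le _ _ _).1 h)
  · exact (pv_B_pairwise d).imp_of_mem (fun _ _ h => (pvR_iff_key_le _ _ _).1 h)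

-- ===== VERDICT (by name: the statement is the Claim_ definition above) =====
theorem get_vulnerability_types_priority_spec : Claim_equal_get_vulnerability_types_priority := by
  intro d _ _
  unfold Spec_get_vulnerability_types_priority
  exact pv_main d
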